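-- pv_equiv track=rewrite | github.com/nobe0716/problem_solving | codeforces/contests/1537/D. Deleting Divisors.py | solve
-- ===== SOURCE A (Python) =====
-- def solve(n):
--     if n % 2 == 1:
--         return 'Bob'
--     cnt = 0
--     while n % 2 == 0:
--         n //= 2
--         cnt += 1
--
--     if n > 1 or cnt % 2 == 0:
--         return 'Alice'
--     return 'Bob'
-- ===== SOURCE B (Python) =====
-- def solve(n):
--     if n % 2:
--         return 'Bob'
--     low = n & -n
--     e = low.bit_length() - 1
--     return 'Alice' if n // low > 1 or e % 2 == 0 else 'Bob'
-- ===== Notes on version B (the rewrite author's own statement) =====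
-- stated objective: alternative
-- what changed: Replaces A's while-loop that repeatedly divides by two with a closed-form bit computation: the lowest set bit n & -n gives the power-of-two factor, bit_length gives its exponent, and one division gives the odd part; Pre_ excludes only the input where A's loop never terminates.
-- outside the precondition, e.g. on solve(0): A does not finish within the time limit, B raises ZeroDivisionError
import Mathlib
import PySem

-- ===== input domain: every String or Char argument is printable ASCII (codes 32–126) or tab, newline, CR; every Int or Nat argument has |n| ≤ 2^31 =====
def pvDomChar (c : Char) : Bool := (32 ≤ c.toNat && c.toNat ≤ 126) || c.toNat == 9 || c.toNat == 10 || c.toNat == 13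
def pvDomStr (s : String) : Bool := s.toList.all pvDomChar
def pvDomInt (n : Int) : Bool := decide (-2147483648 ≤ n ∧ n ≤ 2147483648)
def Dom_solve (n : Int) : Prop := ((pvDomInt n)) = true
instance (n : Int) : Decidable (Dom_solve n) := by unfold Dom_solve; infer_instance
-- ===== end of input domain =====

-- B replaces A's divide-by-2 loop with a closed-form bit computation (lowest set bit + bit_length);
-- equivalence is claimed for n ≠ 0 (A's loop never terminates at n = 0).

-- ===== PORT A =====
-- the while loop of A; fuel is only a totality guard (|n| ≤ 2^31 needs < 64 iterations)
def stripLoop : Nat → Int → Int → Int × Int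
  | 0, n, cnt => (n, cnt)
  | fuel + 1, n, cnt =>
    if PySem.Int.mod n 2 = 0 then stripLoop fuel (PySem.Int.floordiv n 2) (cnt + 1)
    else (n, cnt)

def solve (n : Int) : String :=
  if PySem.Int.mod n 2 = 1 then "Bob"
  else
    let r := stripLoop 64 n 0
    if r.1 > 1 ∨ PySem.Int.mod r.2 2 = 0 then "Alice" else "Bob"

-- ===== PORT B =====
def solve_alt (n : Int) : String :=
  if PySem.Int.mod n 2 ≠ 0 then "Bob"
  else
    let low := PySem.Int.band n (-n)
    let e : Int := (PySem.Int.bitLength low : Int) - 1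
    if PySem.Int.floordiv n low > 1 ∨ PySem.Int.mod e 2 = 0 then "Alice" else "Bob"

-- ===== PRECONDITION & SPEC =====
-- Pre_ excludes exactly n = 0: there A's while loop never terminates (and B raises ZeroDivisionError).
def Pre_solve (n : Int) : Prop := n ≠ 0
instance (n : Int) : Decidable (Pre_solve n) := by unfold Pre_solve; infer_instance
def pvWitness_solve : Int := (6)

def Spec_solve (n : Int) (out : String) : Prop := out = solve_alt n
instance (n : Int) (out : String) : Decidable (Spec_solve n out) := by unfold Spec_solve; infer_instance

-- ===== CLAIM (what is proved, stated in full; the proofs are below) =====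
def Claim_equal_solve : Prop := ∀ (n : Int), Dom_solve n → Pre_solve n → Spec_solve n (solve n)

-- ===== LEMMAS AND PROOFS =====

-- 2-adic valuation of a natural number
def v2 : Nat → Nat
  | 0 => 0
  | m + 1 => if (m + 1) % 2 = 0 then v2 ((m + 1) / 2) + 1 else 0
decreasing_by exact Nat.div_lt_self (Nat.succ_pos m) (by omega)

lemma v2_odd {a : Nat} (h : a % 2 = 1) : v2 a = 0 := by
  cases a with
  | zero => simp at h
  | succ m => rw [v2]; simp [h]

lemma v2_even {a : Nat} (h0 : 0 < a) (h : a % 2 = 0) : v2 a = v2 (a / 2) + 1 := by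
  cases a with
  | zero => omega
  | succ m => rw [v2]; simp [h]

lemma v2_spec : ∀ a : Nat, 0 < a → 2 ^ v2 a ∣ a ∧ (a / 2 ^ v2 a) % 2 = 1 := by
  intro a
  induction a using Nat.strong_induction_on with
  | _ a ih =>
    intro ha
    rcases Nat.mod_two_eq_zero_or_one a with h | h
    · have hd : a / 2 < a := Nat.div_lt_self ha (by omega)
      have h2 : 0 < a / 2 := by omega
      obtain ⟨hdvd, hodd⟩ := ih (a / 2) hd h2
      rw [v2_even ha h]
      constructor
      · rcases hdvd with ⟨c, hc⟩
        refine ⟨c, ?_⟩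
        calc a = 2 * (a / 2) := by omega
          _ = 2 * (2 ^ v2 (a / 2) * c) := by conv_lhs => rw [hc]
          _ = 2 ^ (v2 (a / 2) + 1) * c := by ring
      · rw [pow_succ, Nat.mul_comm (2 ^ v2 (a / 2)) 2, ← Nat.div_div_eq_div_mul]
        exact hodd
    · rw [v2_odd h]; simpa using h

lemma v2_le {a : Nat} (ha : 0 < a) : 2 ^ v2 a ≤ a :=
  Nat.le_of_dvd ha (v2_spec a ha).1

-- the lowest-set-bit identity on Nat:  m - (m &&& (m-1)) = 2 ^ v2 m
lemma lowbit_nat : ∀ m : Nat, 0 < m → m - (m &&& (m - 1)) = 2 ^ v2 m := by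
  intro m
  induction m using Nat.strong_induction_on with
  | _ m ih =>
    intro hm
    have hx2 : (m &&& (m - 1)) / 2 = m / 2 &&& (m - 1) / 2 := Nat.and_div_two
    rcases Nat.mod_two_eq_zero_or_one m with h | h
    · -- m even
      have hb : 0 < m / 2 := by omega
      have h1 : (m - 1) / 2 = m / 2 - 1 := by omega
      rw [h1] at hx2
      have hxm : (m &&& (m - 1)) % 2 = 0 := by
        have := Nat.and_mod_two_eq_one (a := m) (b := m - 1)
        omega
      have hle : (m / 2 &&& (m / 2 - 1)) ≤ m / 2 := Nat.and_le_left
      have hih := ih (m / 2) (by omega) hb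
      have hdecomp : m &&& (m - 1) = 2 * (m / 2 &&& (m / 2 - 1)) := by
        have := Nat.div_add_mod (m &&& (m - 1)) 2
        omega
      rw [v2_even hm h, pow_succ]
      omega
    · -- m odd : m &&& (m-1) = m - 1
      have h1 : (m - 1) / 2 = m / 2 := by omega
      rw [h1, Nat.and_self] at hx2
      have hxm : (m &&& (m - 1)) % 2 = 0 := by
        have := Nat.and_mod_two_eq_one (a := m) (b := m - 1)
        omega
      have : m &&& (m - 1) = m - 1 := by
        have := Nat.div_add_mod (m &&& (m - 1)) 2
        have := Nat.div_add_mod m 2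
        omega
      rw [v2_odd h, this]
      omega

-- n & -n = 2 ^ v2 |n| for n ≠ 0
lemma band_self_neg (n : Int) (hn : n ≠ 0) :
    PySem.Int.band n (-n) = ((2 ^ v2 n.natAbs : Nat) : Int) := by
  rcases lt_or_gt_of_ne hn with hneg | hpos
  · have h1 : ¬ (0 ≤ n) := by omega
    have h2 : (0 : Int) ≤ -n := by omega
    simp only [PySem.Int.band, if_neg h1, if_pos h2]
    have e1 : (-n).toNat = n.natAbs := by omega
    have e2 : (-n - 1).toNat = n.natAbs - 1 := by omega
    rw [e1, e2, lowbit_nat n.natAbs (by omega)]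
  · have h1 : (0 : Int) ≤ n := by omega
    have h2 : ¬ ((0 : Int) ≤ -n) := by omega
    simp only [PySem.Int.band, if_pos h1, if_neg h2]
    have e1 : n.toNat = n.natAbs := by omega
    have e2 : (- -n - 1).toNat = n.natAbs - 1 := by omega
    rw [e1, e2, lowbit_nat n.natAbs (by omega)]

lemma bitLength_two_pow (k : Nat) : PySem.Int.bitLength ((2 ^ k : Nat) : Int) = k + 1 := by
  induction k with
  | zero => decide
  | succ j ih =>
    rw [PySem.Int.bitLength_natCast (m := 2 ^ (j + 1)) (by positivity)]
    have : 2 ^ (j + 1) / 2 = 2 ^ j := by omega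
    rw [this, ih]

lemma stripLoop_eq : ∀ (fuel k : Nat) (m cnt : Int), k < fuel → PySem.Int.mod m 2 ≠ 0 →
    stripLoop fuel (2 ^ k * m) cnt = (m, cnt + k) := by
  intro fuel
  induction fuel with
  | zero => omega
  | succ f ih =>
    intro k m cnt hk hm
    cases k with
    | zero =>
      rw [pow_zero, one_mul, stripLoop, if_neg hm]
      simp
    | succ j =>
      have hdvd : (2 : Int) ∣ 2 ^ (j + 1) * m := ⟨2 ^ j * m, by ring⟩
      have hmod : PySem.Int.mod (2 ^ (j + 1) * m) 2 = 0 :=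
        (PySem.Int.mod_eq_zero_iff_dvd _ _).2 hdvd
      have hdiv : PySem.Int.floordiv (2 ^ (j + 1) * m) 2 = 2 ^ j * m := by
        rw [PySem.Int.floordiv_eq_ediv_of_pos (by omega)]
        have : (2 : Int) ^ (j + 1) * m = 2 * (2 ^ j * m) := by ring
        rw [this, Int.mul_ediv_cancel_left _ (by omega)]
      rw [stripLoop, if_pos hmod, hdiv, ih j m (cnt + 1) (by omega) hm]
      simp only [Prod.mk.injEq, true_and]
      push_cast
      ring

-- ===== VERDICT (by name: the statement is the Claim_ definition above) =====
theorem solve_spec : Claim_equal_solve := by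
  intro n hdom hpre
  show solve n = solve_alt n
  rcases PySem.Int.mod_two_eq n with he | ho
  · -- n even: both sides strip the power of two, A by looping, B in closed form
    have hpos : 0 < n.natAbs := Int.natAbs_pos.2 hpre
    obtain ⟨hdvd, hodd⟩ := v2_spec n.natAbs hpos
    have hbound : n.natAbs ≤ 2 ^ 31 := by
      have : (-2147483648 : Int) ≤ n ∧ n ≤ 2147483648 := by
        have := hdom
        unfold Dom_solve pvDomInt at this
        simpa using this
      omega
    have hk31 : v2 n.natAbs ≤ 31 := by
      by_contra hgt
      have h1 : 2 ^ 32 ≤ 2 ^ v2 n.natAbs := Nat.pow_le_pow_right (by omega) (by omega)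
      have h2 := v2_le hpos
      omega
    obtain ⟨k, hkdef⟩ : ∃ k, v2 n.natAbs = k := ⟨_, rfl⟩
    rw [hkdef] at hdvd hodd hk31
    have hdvdZ : ((2 : Int) ^ k) ∣ n := by
      rw [← Int.natAbs_dvd_natAbs]
      simpa using hdvd
    obtain ⟨m, hm⟩ := hdvdZ
    have habs : n.natAbs = 2 ^ k * m.natAbs := by
      conv_lhs => rw [hm]
      rw [Int.natAbs_mul]
      simp [Int.natAbs_pow]
    have hmodd : PySem.Int.mod m 2 ≠ 0 := by
      intro hc
      rcases (PySem.Int.mod_eq_zero_iff_dvd m 2).1 hc with ⟨c, hcc⟩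
      have : m.natAbs % 2 = 0 := by
        rw [hcc, Int.natAbs_mul]
        simp [Nat.mul_mod_right]
      have hq : n.natAbs / 2 ^ k = m.natAbs := by
        rw [habs, Nat.mul_div_cancel_left _ (by positivity)]
      omega
    have hA : stripLoop 64 n 0 = (m, 0 + (k : Int)) := by
      conv_lhs => rw [hm]
      exact stripLoop_eq 64 k m 0 (by omega) hmodd
    have hband : PySem.Int.band n (-n) = ((2 ^ k : Nat) : Int) := by
      rw [band_self_neg n hpre, hkdef]
    have hcast : ((2 ^ k : Nat) : Int) = (2 : Int) ^ k := by
      push_cast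
      ring
    have hfd : PySem.Int.floordiv n ((2 ^ k : Nat) : Int) = m := by
      rw [hcast, PySem.Int.floordiv_eq_ediv_of_pos (by positivity)]
      conv_lhs => rw [hm]
      rw [Int.mul_ediv_cancel_left _ (by positivity)]
    have hbl : (PySem.Int.bitLength ((2 ^ k : Nat) : Int) : Int) - 1 = (k : Int) := by
      rw [bitLength_two_pow]
      push_cast
      ring
    simp only [solve, solve_alt, he, if_neg (by omega : ¬ (0 : Int) = 1),
      if_neg (not_ne_iff.mpr rfl : ¬ (0 : Int) ≠ 0)]
    rw [hA, hband, hfd, hbl]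
    simp
  · -- n odd: both return "Bob" immediately
    simp only [solve, solve_alt]
    rw [if_pos ho, if_pos (by rw [ho]; exact one_ne_zero)]
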